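-- pv_equiv track=rewrite | github.com/nakoibes/algorithms | longest_monotonous_subsequence.py | find_longest_descending
-- ===== SOURCE A (Python) =====
-- def find_longest_descending(sequence: list):
--     best_start = 0
--     best_finish = 0
--     start = 0
--     finish = 0
--     max_len = 0
--     for i in range(len(sequence) - 1):
--         if sequence[i + 1] >= sequence[i]:
--             if finish - start > max_len:
--                 best_start = start
--                 best_finish = finish
--                 max_len = finish - start
--             start = i + 1
--             finish = i + 1
--         else:
--             finish = i + 1
--
--     if finish - start > max_len:
--         best_start = start
--         best_finish = finish
--
--     return best_start, best_finish
-- ===== SOURCE B (Python) =====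
-- def find_longest_descending(sequence: list):
--     n = len(sequence)
--     # first pass: materialize all maximal strictly-descending contiguous runs
--     runs = []
--     i = 0
--     while i < n:
--         j = i
--         while j + 1 < n and sequence[j + 1] < sequence[j]:
--             j += 1
--         runs.append((i, j))
--         i = j + 1
--     # second pass: pick the run with the largest length, first on ties
--     best = (0, 0)
--     best_len = 0
--     for s, e in runs:
--         if e - s > best_len:
--             best = (s, e)
--             best_len = e - s
--     return best
-- ===== Notes on version B (the rewrite author's own statement) =====
-- stated objective: alternative
-- what changed: B replaces A's single stateful sweep (current-run bookkeeping interleaved with best tracking) by two passes: it first materializes the list of maximal strictly-descending runs as (start,end) pairs, then scans that run table to select the first longest run.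
import Mathlib
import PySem

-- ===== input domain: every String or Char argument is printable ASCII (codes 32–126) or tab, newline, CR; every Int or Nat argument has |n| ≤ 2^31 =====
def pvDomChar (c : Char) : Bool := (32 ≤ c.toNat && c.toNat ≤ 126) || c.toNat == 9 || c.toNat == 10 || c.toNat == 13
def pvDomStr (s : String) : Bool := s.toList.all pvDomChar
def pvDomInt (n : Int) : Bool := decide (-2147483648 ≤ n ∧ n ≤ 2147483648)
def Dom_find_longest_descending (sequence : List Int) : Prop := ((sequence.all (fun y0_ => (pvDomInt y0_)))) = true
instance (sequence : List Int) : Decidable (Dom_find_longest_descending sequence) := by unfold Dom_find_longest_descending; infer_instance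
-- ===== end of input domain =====

-- B restructures A's single stateful sweep into two passes: materialize all maximal
-- strictly-descending runs, then select the first longest one (objective: alternative).

-- ===== PORT A =====
-- state: (best_start, best_finish, start, finish, max_len); indices are Nat (all of A's
-- index variables stay nonnegative), length comparisons done in Int exactly as Python does
def fldA (sequence : List Int) (s : Nat × Nat × Nat × Nat × Int) (i : Nat) :
    Nat × Nat × Nat × Nat × Int :=
  let (bs, bf, start, finish, maxLen) := s
  if sequence.getD (i + 1) 0 ≥ sequence.getD i 0 then
    if (finish : Int) - (start : Int) > maxLen then
      (start, finish, i + 1, i + 1, (finish : Int) - (start : Int))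
    else
      (bs, bf, i + 1, i + 1, maxLen)
  else
    (bs, bf, start, i + 1, maxLen)

def find_longest_descending (sequence : List Int) : Int × Int :=
  let r := (List.range (sequence.length - 1)).foldl (fldA sequence) (0, 0, 0, 0, 0)
  let (bs, bf, start, finish, maxLen) := r
  if (finish : Int) - (start : Int) > maxLen then ((start : Int), (finish : Int))
  else ((bs : Int), (bf : Int))

-- ===== PORT B =====
-- inner while loop: extend the run while the next element is strictly smaller
def runEnd (sequence : List Int) (j : Nat) : Nat :=
  if h : j + 1 < sequence.length ∧ sequence.getD (j + 1) 0 < sequence.getD j 0 then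
    runEnd sequence (j + 1)
  else j
termination_by sequence.length - j
decreasing_by omega

theorem runEnd_ge (sequence : List Int) (j : Nat) : j ≤ runEnd sequence j := by
  fun_induction runEnd sequence j with
  | case1 j h ih => omega
  | case2 j h => omega

-- outer while loop: collect the maximal runs as (start, end) pairs
def collectRuns (sequence : List Int) (i : Nat) : List (Nat × Nat) :=
  if h : i < sequence.length then
    (i, runEnd sequence i) :: collectRuns sequence (runEnd sequence i + 1)
  else []
termination_by sequence.length - i
decreasing_by have := runEnd_ge sequence i; omega

-- second pass: first longest run wins; (0,0) when the best length is 0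
def iUpd (acc : (Int × Int) × Int) (se : Nat × Nat) : (Int × Int) × Int :=
  if (se.2 : Int) - (se.1 : Int) > acc.2 then
    (((se.1 : Int), (se.2 : Int)), (se.2 : Int) - (se.1 : Int))
  else acc

def find_longest_descending_alt (sequence : List Int) : Int × Int :=
  ((collectRuns sequence 0).foldl iUpd (((0 : Int), (0 : Int)), (0 : Int))).1

-- ===== PRECONDITION & SPEC =====
def Spec_find_longest_descending (sequence : List Int) (out : Int × Int) : Prop := out = find_longest_descending_alt sequence
instance (sequence : List Int) (out : Int × Int) : Decidable (Spec_find_longest_descending sequence out) := by unfold Spec_find_longest_descending; infer_instance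

-- ===== CLAIM (what is proved, stated in full; the proofs are below) =====
def Claim_equal_find_longest_descending : Prop := ∀ (sequence : List Int), Dom_find_longest_descending sequence → Spec_find_longest_descending sequence (find_longest_descending sequence)

-- ===== LEMMAS AND PROOFS =====

-- start index of the maximal run containing k, computed A-style (ascending)
def curStart (sequence : List Int) : Nat → Nat
  | 0 => 0
  | k + 1 =>
    if sequence.getD (k + 1) 0 ≥ sequence.getD k 0 then k + 1 else curStart sequence k

-- the runs that have fully ended strictly before index k, in order
def runsBefore (sequence : List Int) : Nat → List (Nat × Nat)
  | 0 => []
  | k + 1 =>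
    if sequence.getD (k + 1) 0 ≥ sequence.getD k 0 then
      runsBefore sequence k ++ [(curStart sequence k, k)]
    else runsBefore sequence k

-- Nat-indexed version of the selection fold
def nUpd (acc : (Nat × Nat) × Int) (se : Nat × Nat) : (Nat × Nat) × Int :=
  if (se.2 : Int) - (se.1 : Int) > acc.2 then ((se.1, se.2), (se.2 : Int) - (se.1 : Int))
  else acc

theorem curStart_le (sequence : List Int) (k : Nat) : curStart sequence k ≤ k := by
  induction k with
  | zero => simp [curStart]
  | succ k ih => simp only [curStart]; split <;> omega

-- invariant of A's fold after processing range k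
theorem foldA_inv (sequence : List Int) (k : Nat) :
    (List.range k).foldl (fldA sequence) (0, 0, 0, 0, 0) =
      (((runsBefore sequence k).foldl nUpd ((0, 0), 0)).1.1,
       ((runsBefore sequence k).foldl nUpd ((0, 0), 0)).1.2,
       curStart sequence k, k,
       ((runsBefore sequence k).foldl nUpd ((0, 0), 0)).2) := by
  induction k with
  | zero => rfl
  | succ k ih =>
    rw [List.range_succ, List.foldl_append, ih]
    simp only [List.foldl_cons, List.foldl_nil, fldA, runsBefore, curStart]
    by_cases hc : sequence.getD (k + 1) 0 ≥ sequence.getD k 0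
    · rw [if_pos hc, if_pos hc, if_pos hc, List.foldl_append, List.foldl_cons, List.foldl_nil]
      by_cases h2 : ((k : Int) - (curStart sequence k : Int) >
          ((runsBefore sequence k).foldl nUpd ((0, 0), 0)).2)
      · rw [if_pos h2, show nUpd ((runsBefore sequence k).foldl nUpd ((0, 0), 0))
            (curStart sequence k, k) = ((curStart sequence k, k),
              (k : Int) - (curStart sequence k : Int)) from by simp [nUpd, h2]]
      · rw [if_neg h2, show nUpd ((runsBefore sequence k).foldl nUpd ((0, 0), 0))
            (curStart sequence k, k) = (runsBefore sequence k).foldl nUpd ((0, 0), 0) from by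
              simp [nUpd, h2]]
    · rw [if_neg hc, if_neg hc, if_neg hc]

-- relates the two recursion schemes: the runs completed before k plus the runs found
-- run-by-run from curStart k are all the runs; runEnd is constant along the current run
theorem runs_inv (sequence : List Int) (k : Nat) (hk : k < sequence.length) :
    collectRuns sequence 0 =
        runsBefore sequence k ++ collectRuns sequence (curStart sequence k) ∧
      runEnd sequence (curStart sequence k) = runEnd sequence k := by
  induction k with
  | zero => exact ⟨rfl, rfl⟩
  | succ k ih =>
    have hk' : k < sequence.length := by omega
    obtain ⟨hR, hE⟩ := ih hk'
    simp only [runsBefore, curStart]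
    by_cases hc : sequence.getD (k + 1) 0 ≥ sequence.getD k 0
    · have hek : runEnd sequence k = k := by
        rw [runEnd]; rw [dif_neg (by omega)]
      have hcoll : collectRuns sequence (curStart sequence k) =
          (curStart sequence k, k) :: collectRuns sequence (k + 1) := by
        rw [collectRuns]
        have hle := curStart_le sequence k
        rw [dif_pos (by omega), hE, hek]
      rw [if_pos hc, if_pos hc]
      exact ⟨by rw [hR, hcoll]; simp, rfl⟩
    · have hstep : runEnd sequence k = runEnd sequence (k + 1) := by
        rw [runEnd]; rw [dif_pos ⟨hk, by omega⟩]
      rw [if_neg hc, if_neg hc]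
      exact ⟨hR, by rw [hE, hstep]⟩

-- the Int-valued selection fold is the cast of the Nat-valued one
theorem sel_cast (l : List (Nat × Nat)) (acc : (Nat × Nat) × Int) :
    l.foldl iUpd (((acc.1.1 : Int), (acc.1.2 : Int)), acc.2) =
      ((((l.foldl nUpd acc).1.1 : Int), ((l.foldl nUpd acc).1.2 : Int)),
        (l.foldl nUpd acc).2) := by
  induction l generalizing acc with
  | nil => rfl
  | cons p l ih =>
    simp only [List.foldl_cons]
    by_cases hc : (p.2 : Int) - (p.1 : Int) > acc.2
    · rw [show iUpd (((acc.1.1 : Int), (acc.1.2 : Int)), acc.2) p =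
          ((((p.1 : Nat) : Int), ((p.2 : Nat) : Int)), (p.2 : Int) - (p.1 : Int)) from by
            simp [iUpd, hc],
        show nUpd acc p = ((p.1, p.2), (p.2 : Int) - (p.1 : Int)) from by simp [nUpd, hc]]
      exact ih ((p.1, p.2), (p.2 : Int) - (p.1 : Int))
    · rw [show iUpd (((acc.1.1 : Int), (acc.1.2 : Int)), acc.2) p =
          (((acc.1.1 : Int), (acc.1.2 : Int)), acc.2) from by simp [iUpd, hc],
        show nUpd acc p = acc from by simp [nUpd, hc]]
      exact ih acc

-- ===== VERDICT (by name: the statement is the Claim_ definition above) =====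
theorem find_longest_descending_spec : Claim_equal_find_longest_descending := by
  intro sequence _
  unfold Spec_find_longest_descending
  rcases hn : sequence.length with _ | m
  · have : sequence = [] := List.eq_nil_of_length_eq_zero hn
    subst this
    unfold find_longest_descending find_longest_descending_alt
    rw [collectRuns, dif_neg (by simp)]
    rfl
  · have hm : m < sequence.length := by omega
    obtain ⟨hR, hE⟩ := runs_inv sequence m hm
    have hem : runEnd sequence m = m := by
      rw [runEnd]; rw [dif_neg (by omega)]
    have hcs := curStart_le sequence m
    have hlast : collectRuns sequence (curStart sequence m) = [(curStart sequence m, m)] := by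
      rw [collectRuns, dif_pos (by omega), hE, hem, collectRuns, dif_neg (by omega)]
    have hall : collectRuns sequence 0 =
        runsBefore sequence m ++ [(curStart sequence m, m)] := by rw [hR, hlast]
    unfold find_longest_descending find_longest_descending_alt
    rw [hn, hall]
    simp only [Nat.add_sub_cancel, foldA_inv]
    rw [List.foldl_append, List.foldl_cons, List.foldl_nil]
    have hcast := sel_cast (runsBefore sequence m) ((0, 0), 0)
    simp only [Nat.cast_zero] at hcast
    rw [hcast]
    by_cases h2 : ((m : Int) - (curStart sequence m : Int) >
        ((runsBefore sequence m).foldl nUpd ((0, 0), 0)).2)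
    · rw [if_pos h2]; simp [iUpd, h2]
    · rw [if_neg h2]; simp [iUpd, h2]
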